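-- pv_equiv track=rewrite | github.com/Adam-Jimenez/binarysearch-editorials | Remove Last Duplicate Entries.py | solve
-- ===== SOURCE A (Python) =====
-- from collections import Counter
--
-- def solve(nums):
--     c=Counter(nums)
--     dup={x for x,f in c.items() if f>1}
--     ans=[]
--     for n in nums:
--         if c[n]!=1 or n not in dup:
--             ans.append(n)
--             c[n]-=1
--     return ans
-- ===== SOURCE B (Python) =====
-- def solve(nums):
--     return [n for i, n in enumerate(nums) if n in nums[i+1:] or n not in nums[:i]]
-- ===== Notes on version B (the rewrite author's own statement) =====
-- stated objective: simpler
-- what changed: B drops all counting: a single comprehension keeps n at position i iff n reappears in nums[i+1:] or never occurred in nums[:i] (slice-membership criterion), instead of A's Counter build plus a decrement-the-counter sentinel scan; B uses no dict/Counter at all, trading O(n) for O(n^2).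
import Mathlib
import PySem

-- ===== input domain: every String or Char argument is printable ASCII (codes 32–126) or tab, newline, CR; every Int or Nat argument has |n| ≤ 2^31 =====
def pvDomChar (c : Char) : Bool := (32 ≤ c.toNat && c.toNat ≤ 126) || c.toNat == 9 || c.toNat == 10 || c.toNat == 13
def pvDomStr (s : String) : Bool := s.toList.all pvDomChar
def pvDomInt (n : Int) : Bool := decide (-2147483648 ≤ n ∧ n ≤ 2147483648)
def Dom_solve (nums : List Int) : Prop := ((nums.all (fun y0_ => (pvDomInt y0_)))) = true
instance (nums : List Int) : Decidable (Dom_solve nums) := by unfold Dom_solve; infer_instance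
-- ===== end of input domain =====

-- B replaces A's Counter-plus-decrement sentinel scan by a single slice-membership
-- comprehension with no counting and no dicts (objective: simpler; B is O(n^2)).

-- ===== PORT A =====
-- A: c = Counter(nums); dup = {x for x,f in c.items() if f>1}; then a scan that
-- appends n and decrements c[n] unless c[n]==1 and n in dup.
def solve (nums : List Int) : List Int :=
  let c : PySem.Dict Int Int := PySem.Dict.counter nums
  let dup : PySem.Set Int :=
    PySem.Set.ofList ((c.items.filter (fun p => decide (p.2 > 1))).map Prod.fst)
  (nums.foldl
    (fun (st : PySem.Dict Int Int × List Int) n =>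
      if st.1.getD n 0 ≠ 1 ∨ ¬ PySem.Set.contains dup n = true then
        (st.1.modify n 0 (· - 1), st.2 ++ [n])
      else st)
    (c, [])).2

-- ===== PORT B =====
-- B: [n for i, n in enumerate(nums) if n in nums[i+1:] or n not in nums[:i]]
def solve_alt (nums : List Int) : List Int :=
  ((PySem.List.enumerate nums).filter
    (fun p => decide (p.2 ∈ PySem.List.slice nums (some (p.1 + 1)) none)
           || !decide (p.2 ∈ PySem.List.slice nums none (some p.1)))).map Prod.snd

-- ===== PRECONDITION & SPEC =====
def Spec_solve (nums : List Int) (out : List Int) : Prop := out = solve_alt nums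
instance (nums : List Int) (out : List Int) : Decidable (Spec_solve nums out) := by unfold Spec_solve; infer_instance

-- ===== CLAIM (what is proved, stated in full; the proofs are below) =====
def Claim_equal_solve : Prop := ∀ (nums : List Int), Dom_solve nums → Spec_solve nums (solve nums)

-- ===== LEMMAS AND PROOFS =====

-- Canonical middle form: keep n (at the head of the remaining suffix t) iff n occurs
-- again later or n is not duplicated in the full list.
def keepFn (full : List Int) : List Int → List Int
  | [] => []
  | n :: t => if n ∈ t ∨ full.count n ≤ 1 then n :: keepFn full t else keepFn full t

-- dup membership ↔ duplicated value
lemma dup_contains (nums : List Int) (n : Int) :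
    PySem.Set.contains
      (PySem.Set.ofList
        (((PySem.Dict.counter nums).items.filter (fun p => decide (p.2 > 1))).map Prod.fst))
      n = true ↔ 1 < nums.count n := by
  rw [PySem.Set.contains_iff, PySem.Set.mem_ofList, PySem.Dict.items_counter]
  simp only [List.filter_map, List.map_map, List.mem_map, List.mem_filter, Function.comp]
  constructor
  · rintro ⟨k, ⟨-, hgt⟩, rfl⟩
    simpa using hgt
  · intro h
    refine ⟨n, ⟨?_, by simpa using h⟩, rfl⟩
    have : 0 < nums.count n := by omega
    exact (PySem.Set.mem_ofList nums n).mpr (List.count_pos_iff.mp this)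

-- A's loop with the counter invariant computes keepFn
lemma A_loop (nums : List Int) (dup : PySem.Set Int)
    (hdup : ∀ n, PySem.Set.contains dup n = true ↔ 1 < nums.count n) :
    ∀ (suf : List Int) (c : PySem.Dict Int Int) (ans : List Int),
      (∀ n ∈ suf, c.getD n 0 = (suf.count n : Int)) →
      (suf.foldl
        (fun (st : PySem.Dict Int Int × List Int) n =>
          if st.1.getD n 0 ≠ 1 ∨ ¬ PySem.Set.contains dup n = true then
            (st.1.modify n 0 (· - 1), st.2 ++ [n])
          else st)
        (c, ans)).2 = ans ++ keepFn nums suf := by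
  intro suf
  induction suf with
  | nil => intro c ans _; simp [keepFn]
  | cons n t ih =>
    intro c ans hinv
    have hcn : c.getD n 0 = ((n :: t).count n : Int) := hinv n (by simp)
    have hcount : (n :: t).count n = t.count n + 1 := by simp
    have hcond : (c.getD n 0 ≠ 1 ∨ ¬ PySem.Set.contains dup n = true)
        ↔ (n ∈ t ∨ nums.count n ≤ 1) := by
      rw [hcn, hdup]
      constructor
      · rintro (h | h)
        · left
          have : t.count n ≠ 0 := by
            intro h0; apply h; rw [hcount, h0]; norm_num
          exact List.count_pos_iff.mp (Nat.pos_of_ne_zero this)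
        · right; omega
      · rintro (h | h)
        · left
          have : 0 < t.count n := List.count_pos_iff.mpr h
          rw [hcount]; push_cast; omega
        · right; omega
    simp only [List.foldl_cons, keepFn]
    by_cases hk : n ∈ t ∨ nums.count n ≤ 1
    · rw [if_pos (hcond.mpr hk), if_pos hk]
      rw [ih (c.modify n 0 (· - 1)) (ans ++ [n]) ?_, List.append_assoc]
      · rfl
      · intro m hm
        rw [PySem.Dict.getD_modify]
        by_cases hmn : m = n
        · subst hmn
          rw [if_pos rfl, hcn, hcount]; push_cast; ring
        · rw [if_neg hmn, hinv m (by simp [hm]),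
            List.count_cons_of_ne (fun h => hmn h.symm)]
    · rw [if_neg (fun hc => hk (hcond.mp hc)), if_neg hk]
      push Not at hk
      apply ih
      intro m hm
      have hmn : m ≠ n := fun h => hk.1 (h ▸ hm)
      rw [hinv m (by simp [hm]), List.count_cons_of_ne (fun h => hmn h.symm)]

-- the keep criterion by slice membership ↔ the keep criterion by count
lemma keep_cond (pre t : List Int) (n : Int) :
    (n ∈ t ∨ n ∉ pre) ↔ (n ∈ t ∨ (pre ++ n :: t).count n ≤ 1) := by
  have hc : (pre ++ n :: t).count n = pre.count n + (t.count n + 1) := by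
    simp [List.count_append]
  by_cases hnt : n ∈ t
  · simp [hnt]
  · have ht0 : t.count n = 0 := List.count_eq_zero.mpr hnt
    simp only [hnt, false_or, hc, ht0]
    rw [← List.count_eq_zero]
    omega

-- B's filter pass computes keepFn on every suffix
lemma B_filter (nums : List Int) :
    ∀ (pre suf : List Int), nums = pre ++ suf →
      ((PySem.List.enumerate suf (pre.length : Int)).filter
        (fun p => decide (p.2 ∈ PySem.List.slice nums (some (p.1 + 1)) none)
               || !decide (p.2 ∈ PySem.List.slice nums none (some p.1)))).map Prod.snd
        = keepFn nums suf := by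
  intro pre suf
  induction suf generalizing pre with
  | nil => intro _; simp [PySem.List.enumerate_nil, keepFn]
  | cons n t ih =>
    intro heq
    have hcast : (pre.length : Int) + 1 = ((pre.length + 1 : Nat) : Int) := by push_cast; ring
    have hafter : PySem.List.slice nums (some ((pre.length : Int) + 1)) none = t := by
      rw [hcast, PySem.List.slice_from_natCast, heq]
      rw [show pre.length + 1 = pre.length + [n].length by simp,
        ← List.drop_drop, List.drop_left]
      simp
    have hbefore : PySem.List.slice nums none (some (pre.length : Int)) = pre := by
      rw [PySem.List.slice_to_natCast, heq, List.take_left]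
    have hrest := ih (pre ++ [n]) (by rw [heq]; simp)
    rw [show ((pre ++ [n]).length : Int) = (pre.length : Int) + 1 by simp] at hrest
    rw [PySem.List.enumerate_cons, List.filter_cons]
    have hkeep : (decide (n ∈ PySem.List.slice nums (some ((pre.length : Int) + 1)) none)
          || !decide (n ∈ PySem.List.slice nums none (some (pre.length : Int))))
        = decide (n ∈ t ∨ nums.count n ≤ 1) := by
      rw [hafter, hbefore]
      have := keep_cond pre t n
      rw [heq]
      by_cases hk : n ∈ t ∨ (pre ++ n :: t).count n ≤ 1
      · have h1 : n ∈ t ∨ n ∉ pre := this.mpr hk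
        simp only [hk, decide_true]
        rcases h1 with h | h
        · simp [h]
        · simp [h]
      · have h1 : ¬ (n ∈ t ∨ n ∉ pre) := fun h => hk (this.mp h)
        push Not at h1
        have hp : 0 < pre.count n := List.count_pos_iff.mpr h1.2
        simp [h1.1, h1.2]
        omega
    by_cases hk : n ∈ t ∨ nums.count n ≤ 1
    · rw [hkeep, if_pos (by simpa using hk)]
      simp only [List.map_cons, keepFn, if_pos hk]
      rw [hrest]
    · rw [hkeep, if_neg (by simpa using hk)]
      simp only [keepFn, if_neg hk]
      exact hrest

-- ===== VERDICT (by name: the statement is the Claim_ definition above) =====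
theorem solve_spec : Claim_equal_solve := by
  intro nums _
  unfold Spec_solve solve solve_alt
  have hA := A_loop nums _ (dup_contains nums) nums (PySem.Dict.counter nums) []
    (fun n _ => PySem.Dict.getD_counter nums n)
  rw [hA, List.nil_append]
  have hB := B_filter nums [] nums rfl
  simp only [List.length_nil, Nat.cast_zero] at hB
  exact hB.symm
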